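-- pv_equiv track=rewrite | github.com/tchtinku/Ace_Programming | Multidimensional_Arrays/EmptyCellsInMatrix/BruteForce/EmptyCellsInMatrix.py | process_tasks
-- ===== SOURCE A (Python) =====
-- def count_negative_ones(matrix):
--     count = 0
--     for row in matrix:
--         count += row.count(-1)
--     return count
--
-- def process_tasks(N, K, tasks):
--     # Initialise the matrix with -1
--     matrix = [[-1 for _ in range(N)] for _ in range(N)]
--     output_array = []
--
--     for i, j in  tasks:
--         # Replace the ith row with 0
--         for col in range(N):
--             matrix[i][col] = 0
--
--         # Replace jth col with 0
--         for row in range(N):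
--             matrix[row][j] = 0
--
--         # Count the number of -1 in the matrix
--         count = count_negative_ones(matrix)
--         output_array.append(count)
--
--     return output_array
-- ===== SOURCE B (Python) =====
-- def process_tasks(N, K, tasks):
--     if N <= 0:
--         # the matrix has no cells: every count is 0
--         return [0] * len(tasks)
--     row_marked = [False] * N
--     col_marked = [False] * N
--     rows = 0
--     cols = 0
--     output_array = []
--     for i, j in tasks:
--         if not row_marked[i]:
--             row_marked[i] = True
--             rows += 1
--         if not col_marked[j]:
--             col_marked[j] = True
--             cols += 1
--         output_array.append((N - rows) * (N - cols))
--     return output_array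
-- ===== Notes on version B (the rewrite author's own statement) =====
-- stated objective: faster
-- what changed: Instead of materialising an N x N matrix, zeroing a row and a column per task and rescanning all N^2 cells to count -1 entries, B keeps two boolean marker arrays with running counts of distinct marked rows/columns and emits the closed form (N-rows)*(N-cols) per task (an empty matrix, N<=0, has all counts 0); Pre_ excludes only the inputs on which A raises IndexError (a task index out of range).
import Mathlib
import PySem

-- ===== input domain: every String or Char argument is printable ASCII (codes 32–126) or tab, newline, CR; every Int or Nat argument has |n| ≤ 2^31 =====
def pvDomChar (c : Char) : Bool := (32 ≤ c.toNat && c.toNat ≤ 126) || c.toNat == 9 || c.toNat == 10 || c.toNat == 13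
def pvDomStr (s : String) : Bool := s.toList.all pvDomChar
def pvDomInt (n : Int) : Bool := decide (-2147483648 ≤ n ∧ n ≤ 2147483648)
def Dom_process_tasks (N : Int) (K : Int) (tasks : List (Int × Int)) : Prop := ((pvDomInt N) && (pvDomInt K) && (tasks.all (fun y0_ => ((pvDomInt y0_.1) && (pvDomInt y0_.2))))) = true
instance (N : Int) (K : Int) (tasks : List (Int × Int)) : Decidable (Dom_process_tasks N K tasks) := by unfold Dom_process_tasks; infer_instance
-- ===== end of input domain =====

-- B replaces A's per-task N x N matrix update-and-rescan by two boolean marker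
-- arrays with running counts and the closed form (N-rows)*(N-cols); objective: faster.

-- ===== PORT A =====
def count_negative_ones (matrix : List (List Int)) : Int :=
  matrix.foldl (fun count row => count + (PySem.List.count row (-1) : Int)) 0

-- matrix[i][c] = v  (Python indexing, possibly negative i / c)
def pvSetCell (m : List (List Int)) (i c v : Int) : List (List Int) :=
  PySem.List.pySetD m i (PySem.List.pySetD (PySem.List.pyGetD m i []) c v)

def process_tasks (N : Int) (K : Int) (tasks : List (Int × Int)) : List Int :=
  let matrix : List (List Int) :=
    (PySem.List.pyRange 0 N 1).map (fun _ => (PySem.List.pyRange 0 N 1).map (fun _ => (-1 : Int)))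
  (tasks.foldl (fun (st : List (List Int) × List Int) ij =>
      let m1 := (PySem.List.pyRange 0 N 1).foldl (fun m col => pvSetCell m ij.1 col 0) st.1
      let m2 := (PySem.List.pyRange 0 N 1).foldl (fun m row => pvSetCell m row ij.2 0) m1
      (m2, st.2 ++ [count_negative_ones m2])) (matrix, [])).2

-- ===== PORT B =====
-- state: (row_marked, col_marked, rows, cols, output_array); each 'if not …[i]'
-- block of Source B becomes a pair-valued if (new marker list, new count)
def process_tasks_alt (N : Int) (K : Int) (tasks : List (Int × Int)) : List Int :=
  if N ≤ 0 then List.replicate tasks.length 0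
  else
  let row_marked : List Bool := List.replicate N.toNat false
  let col_marked : List Bool := List.replicate N.toNat false
  (tasks.foldl (fun (st : List Bool × List Bool × Int × Int × List Int) ij =>
      let rr := if !(PySem.List.pyGetD st.1 ij.1 false)
                then (PySem.List.pySetD st.1 ij.1 true, st.2.2.1 + 1)
                else (st.1, st.2.2.1)
      let cc := if !(PySem.List.pyGetD st.2.1 ij.2 false)
                then (PySem.List.pySetD st.2.1 ij.2 true, st.2.2.2.1 + 1)
                else (st.2.1, st.2.2.2.1)
      (rr.1, cc.1, rr.2, cc.2, st.2.2.2.2 ++ [(N - rr.2) * (N - cc.2)]))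
    (row_marked, col_marked, 0, 0, [])).2.2.2.2

-- ===== PRECONDITION & SPEC =====
-- Exactly the inputs on which A raises no IndexError: either N ≤ 0 (the matrix and
-- every inner loop are empty, so indices are never used), or every task index is a
-- valid (possibly negative) Python index into the N×N matrix.
def Pre_process_tasks (N : Int) (K : Int) (tasks : List (Int × Int)) : Prop :=
  N ≤ 0 ∨ ∀ p ∈ tasks, (-N ≤ p.1 ∧ p.1 < N) ∧ (-N ≤ p.2 ∧ p.2 < N)
instance (N : Int) (K : Int) (tasks : List (Int × Int)) : Decidable (Pre_process_tasks N K tasks) := by unfold Pre_process_tasks; infer_instance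

def pvWitness_process_tasks : Int × Int × (List (Int × Int)) := (2, 1, [(0, 1)])

def Spec_process_tasks (N : Int) (K : Int) (tasks : List (Int × Int)) (out : List Int) : Prop := out = process_tasks_alt N K tasks
instance (N : Int) (K : Int) (tasks : List (Int × Int)) (out : List Int) : Decidable (Spec_process_tasks N K tasks out) := by unfold Spec_process_tasks; infer_instance

-- ===== CLAIM (what is proved, stated in full; the proofs are below) =====
def Claim_equal_process_tasks : Prop := ∀ (N : Int) (K : Int) (tasks : List (Int × Int)), Dom_process_tasks N K tasks → Pre_process_tasks N K tasks → Spec_process_tasks N K tasks (process_tasks N K tasks)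

-- ===== LEMMAS AND PROOFS =====

theorem pvMod_spec (N i : Int) (h1 : -N ≤ i) (h2 : i < N) :
    i % N = if 0 ≤ i then i else i + N := by
  split_ifs with h0
  · exact Int.emod_eq_of_lt h0 h2
  · have h : (i + N * 1) % N = i % N := Int.add_mul_emod_self_left i N 1
    rw [mul_one] at h
    rw [← h]
    exact Int.emod_eq_of_lt (by omega) (by omega)

theorem pySetD_mod {α : Type} (N : Int) (m : List α) (i : Int) (v : α)
    (hlen : (m.length : Int) = N) (h1 : -N ≤ i) (h2 : i < N) :
    PySem.List.pySetD m i v = m.set (i % N).toNat v := by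
  rw [pvMod_spec N i h1 h2]
  simp only [PySem.List.pySetD, PySem.List.pySet?, PySem.List.pyIdx?]
  split_ifs with h0 hlt hge
  · rfl
  · omega
  · simp only [Option.map_some, Option.getD_some]
    have : m.length - (-i).toNat = (i + N).toNat := by omega
    rw [this]
  · omega

theorem pyGetD_mod {α : Type} (N : Int) (m : List α) (i : Int) (d : α)
    (hlen : (m.length : Int) = N) (h1 : -N ≤ i) (h2 : i < N) :
    PySem.List.pyGetD m i d = m.getD (i % N).toNat d := by
  rw [pvMod_spec N i h1 h2]
  simp only [PySem.List.pyGetD, PySem.List.pyGet?, PySem.List.pyIdx?]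
  split_ifs with h0 hlt hge
  · rfl
  · omega
  · simp only [Option.bind_some]
    have : m.length - (-i).toNat = (i + N).toNat := by omega
    rw [this, List.getD]
  · omega

theorem pvSetRow (a : Nat) (row : List Int) (h : a < row.length) :
    (List.replicate a (0:Int) ++ row.drop a).set a 0 = List.replicate (a+1) 0 ++ row.drop (a+1) := by
  apply List.ext_getElem
  · simp; omega
  · intro k hk1 hk2
    simp only [List.getElem_set]
    by_cases hka : a = k
    · subst hka
      rw [if_pos rfl, List.getElem_append_left (by simp)]
      simp
    · rw [if_neg hka]
      by_cases hlt : k < a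
      · rw [List.getElem_append_left (by simpa using hlt),
            List.getElem_append_left (by simp; omega)]
        simp
      · rw [List.getElem_append_right (by simp; omega),
            List.getElem_append_right (by simp; omega)]
        simp only [List.length_replicate, List.getElem_drop]
        congr 1; omega

theorem pvRowFill (N : Int) (i : Int) (h1 : -N ≤ i) (h2 : i < N)
    (m : List (List Int)) (hm : (m.length : Int) = N)
    (hrow : ∀ r ∈ m, (r.length : Int) = N) :
    (PySem.List.pyRange 0 N 1).foldl (fun m col => pvSetCell m i col 0) m
      = m.set (i % N).toNat (List.replicate N.toNat 0) := by
  have hN : 0 < N := by omega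
  have hmod := pvMod_spec N i h1 h2
  have hidx : (i % N).toNat < m.length := by omega
  have hrowlen : (m[(i % N).toNat]'hidx).length = N.toNat := by
    have := hrow (m[(i % N).toNat]'hidx) (List.getElem_mem hidx)
    omega
  have aux : ∀ (d : Nat) (a : Int), 0 ≤ a → a + d = N →
      (PySem.List.pyRange a N 1).foldl (fun m col => pvSetCell m i col 0)
        (m.set (i % N).toNat (List.replicate a.toNat 0 ++ (m[(i % N).toNat]'hidx).drop a.toNat))
      = m.set (i % N).toNat (List.replicate N.toNat 0) := by
    intro d
    induction d with
    | zero =>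
      intro a ha0 ha
      rw [PySem.List.pyRange_one_eq_nil (by omega)]
      rw [List.drop_eq_nil_of_le (by omega)]
      have : a.toNat = N.toNat := by omega
      rw [this]
      simp
    | succ d ih =>
      intro a ha0 ha
      rw [PySem.List.pyRange_one_cons (by omega)]
      rw [List.foldl_cons]
      have hstlen : ((m.set (i % N).toNat (List.replicate a.toNat 0 ++ (m[(i % N).toNat]'hidx).drop a.toNat)).length : Int) = N := by
        rw [List.length_set]; omega
      rw [show pvSetCell (m.set (i % N).toNat (List.replicate a.toNat 0 ++ (m[(i % N).toNat]'hidx).drop a.toNat)) i a 0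
            = m.set (i % N).toNat (List.replicate (a+1).toNat 0 ++ (m[(i % N).toNat]'hidx).drop (a+1).toNat) from ?_]
      · exact ih (a+1) (by omega) (by omega)
      · unfold pvSetCell
        rw [pyGetD_mod N _ i [] hstlen h1 h2]
        rw [pySetD_mod N _ i _ hstlen h1 h2]
        rw [List.getD_eq_getElem?_getD]
        rw [List.getElem?_set_self hidx]
        simp only [Option.getD_some]
        rw [PySem.List.pySetD_of_nonneg _ _ ha0]
        rw [pvSetRow a.toNat _ (by omega)]
        rw [List.set_set]
        have h1' : (a + 1).toNat = a.toNat + 1 := by omega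
        rw [h1']
  have h0 := aux N.toNat 0 (by omega) (by omega)
  simp only [Int.toNat_zero, List.drop_zero, List.replicate_zero, List.nil_append] at h0
  rw [List.set_getElem_self] at h0
  exact h0

theorem pvSetColStep (m : List (List Int)) (a : Nat) (h : a < m.length) (f : List Int → List Int) :
    ((m.take a).map f ++ m.drop a).set a (f (m[a]'h)) = (m.take (a+1)).map f ++ m.drop (a+1) := by
  apply List.ext_getElem
  · simp; omega
  · intro k hk1 hk2
    simp only [List.getElem_set]
    by_cases hka : a = k
    · subst hka
      rw [if_pos rfl, List.getElem_append_left (by simp; omega)]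
      simp only [List.getElem_map, List.getElem_take]
    · rw [if_neg hka]
      by_cases hlt : k < a
      · rw [List.getElem_append_left (by simp; omega), List.getElem_append_left (by simp; omega)]
        simp only [List.getElem_map, List.getElem_take]
      · rw [List.getElem_append_right (by simp; omega), List.getElem_append_right (by simp; omega)]
        simp only [List.getElem_drop]
        congr 1
        simp only [List.length_map, List.length_take]
        omega

theorem pvGetMid (m : List (List Int)) (a : Nat) (h : a < m.length) (f : List Int → List Int) :
    ((m.take a).map f ++ m.drop a).getD a [] = m[a]'h := by
  rw [List.getD_eq_getElem?_getD, List.getElem?_append_right (by simp [Nat.le_of_lt h])]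
  simp [Nat.min_eq_left (Nat.le_of_lt h), List.getElem?_drop, List.getElem?_eq_getElem h]

theorem pvColFill (N : Int) (j : Int) (hN : 0 < N)
    (m : List (List Int)) (hm : (m.length : Int) = N) :
    (PySem.List.pyRange 0 N 1).foldl (fun m row => pvSetCell m row j 0) m
      = m.map (fun r => PySem.List.pySetD r j 0) := by
  have aux : ∀ (d : Nat) (a : Int), 0 ≤ a → a + d = N →
      (PySem.List.pyRange a N 1).foldl (fun m row => pvSetCell m row j 0)
        ((m.take a.toNat).map (fun r => PySem.List.pySetD r j 0) ++ m.drop a.toNat)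
      = m.map (fun r => PySem.List.pySetD r j 0) := by
    intro d
    induction d with
    | zero =>
      intro a ha0 ha
      rw [PySem.List.pyRange_one_eq_nil (by omega)]
      rw [List.drop_eq_nil_of_le (by omega)]
      rw [List.take_of_length_le (by omega)]
      simp
    | succ d ih =>
      intro a ha0 ha
      rw [PySem.List.pyRange_one_cons (by omega)]
      rw [List.foldl_cons]
      have hal : a.toNat < m.length := by omega
      have hstlen : (((m.take a.toNat).map (fun r => PySem.List.pySetD r j 0) ++ m.drop a.toNat).length : Int) = N := by
        simp; omega
      rw [show pvSetCell ((m.take a.toNat).map (fun r => PySem.List.pySetD r j 0) ++ m.drop a.toNat) a j 0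
            = (m.take (a+1).toNat).map (fun r => PySem.List.pySetD r j 0) ++ m.drop (a+1).toNat from ?_]
      · exact ih (a+1) (by omega) (by omega)
      · unfold pvSetCell
        rw [PySem.List.pySetD_of_nonneg _ _ ha0]
        rw [pyGetD_mod N _ a [] hstlen (by omega) (by omega)]
        rw [Int.emod_eq_of_lt ha0 (by omega)]
        rw [pvGetMid m a.toNat hal]
        rw [pvSetColStep m a.toNat hal]
        have h1' : (a + 1).toNat = a.toNat + 1 := by omega
        rw [h1']
  have h0 := aux N.toNat 0 (by omega) (by omega)
  simpa using h0

def pvGrid (n : Nat) (R C : List Int) : List (List Int) :=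
  (List.range n).map (fun (r : Nat) =>
    (List.range n).map (fun (c : Nat) => if (r : Int) ∈ R ∨ (c : Int) ∈ C then 0 else -1))

theorem pvGrid_length (n : Nat) (R C : List Int) : (pvGrid n R C).length = n := by
  simp [pvGrid]

theorem pvGrid_row_length (n : Nat) (R C : List Int) (r : List Int)
    (h : r ∈ pvGrid n R C) : r.length = n := by
  simp only [pvGrid, List.mem_map] at h
  obtain ⟨k, -, rfl⟩ := h
  simp

theorem pvGrid_step (n : Nat) (R C R' C' : List Int) (r0 c0 : Nat)
    (hr0 : r0 < n) (hc0 : c0 < n)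
    (hR' : ∀ x, x ∈ R' ↔ x ∈ R ∨ x = (r0 : Int))
    (hC' : ∀ x, x ∈ C' ↔ x ∈ C ∨ x = (c0 : Int)) :
    ((pvGrid n R C).set r0 (List.replicate n 0)).map (fun r => r.set c0 0)
      = pvGrid n R' C' := by
  apply List.ext_getElem
  · simp [pvGrid]
  · intro r hr1 hr2
    have hrn : r < n := by simpa [pvGrid] using hr2
    simp only [List.getElem_map, List.getElem_set, pvGrid]
    apply List.ext_getElem
    · by_cases h : r0 = r <;> simp [h]
    · intro c hc1 hc2
      have hcn : c < n := by simpa using hc2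
      simp only [List.getElem_set, List.getElem_map, List.getElem_range]
      by_cases hrr : r0 = r
      · subst hrr
        have hmem : (r0 : Int) ∈ R' := (hR' _).mpr (Or.inr rfl)
        by_cases hcc : c0 = c <;> simp [hcc, hmem, List.getElem_replicate]
      · simp only [if_neg hrr, List.getElem_map, List.getElem_range]
        by_cases hcc : c0 = c
        · subst hcc
          have : (c0 : Int) ∈ C' := (hC' _).mpr (Or.inr rfl)
          simp [this]
        · simp only [if_neg hcc]
          have hrmem : (r : Int) ∈ R' ↔ (r : Int) ∈ R := by
            rw [hR']
            have : ¬ ((r:Int) = (r0:Int)) := by exact_mod_cast Ne.symm hrr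
            tauto
          have hcmem : (c : Int) ∈ C' ↔ (c : Int) ∈ C := by
            rw [hC']
            have : ¬ ((c:Int) = (c0:Int)) := by exact_mod_cast Ne.symm hcc
            tauto
          by_cases hor : (r:Int) ∈ R ∨ (c:Int) ∈ C
          · rw [if_pos hor, if_pos (by tauto)]
          · rw [if_neg hor, if_neg (by tauto)]

theorem pvCountP_range (n : Nat) (C : List Int) (hC : C.Nodup)
    (hCm : ∀ x ∈ C, 0 ≤ x ∧ x < (n : Int)) :
    (List.range n).countP (fun (c : Nat) => decide ((c : Int) ∈ C)) = C.length := by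
  rw [List.countP_eq_length_filter]
  have hperm : ((List.range n).filter (fun (c : Nat) => decide ((c : Int) ∈ C))).map (fun (c : Nat) => (c : Int)) |>.Perm C := by
    rw [List.perm_ext_iff_of_nodup _ hC]
    · intro x
      constructor
      · intro hx
        simp only [List.mem_map, List.mem_filter, List.mem_range] at hx
        obtain ⟨c, ⟨-, hc⟩, rfl⟩ := hx
        simpa using hc
      · intro hx
        have hb := hCm x hx
        simp only [List.mem_map, List.mem_filter, List.mem_range]
        exact ⟨x.toNat, ⟨by omega, by simp [Int.toNat_of_nonneg hb.1, hx]⟩, by omega⟩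
    · exact (List.Nodup.filter _ (List.nodup_range)).map (fun a b => by omega)
  have := hperm.length_eq
  simpa using this

theorem pvSum_ite (l : List Nat) (K : Int) (p : Nat → Prop) [DecidablePred p] :
    (l.map (fun r => if p r then 0 else K)).sum = K * (l.countP (fun r => !decide (p r)) : Int) := by
  induction l with
  | nil => simp
  | cons x xs ih =>
    simp only [List.map_cons, List.sum_cons, List.countP_cons, ih]
    by_cases h : p x
    · simp [h]
    · simp [h]; push_cast; ring

theorem pvCount_row (n : Nat) (p : Nat → Prop) [DecidablePred p] :
    PySem.List.count ((List.range n).map (fun c => if p c then (0:Int) else -1)) (-1)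
      = (List.range n).countP (fun c => !decide (p c)) := by
  rw [PySem.List.count_eq, List.count, List.countP_map]
  apply List.countP_congr
  intro c _
  by_cases h : p c <;> simp [h]

theorem pvCountP_neg (n : Nat) (C : List Int) (hC : C.Nodup)
    (hCm : ∀ x ∈ C, 0 ≤ x ∧ x < (n : Int)) :
    (List.range n).countP (fun (c : Nat) => !decide ((c : Int) ∈ C)) = n - C.length := by
  have hsplit := List.length_eq_countP_add_countP (fun (c : Nat) => decide ((c:Int) ∈ C)) (l := List.range n)
  rw [pvCountP_range n C hC hCm, List.length_range] at hsplit
  have heq : (List.range n).countP (fun (a : Nat) => decide ¬(decide ((a:Int) ∈ C) = true))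
      = (List.range n).countP (fun (c : Nat) => !decide ((c:Int) ∈ C)) :=
    List.countP_congr (by intro c _; simp)
  omega

theorem pvCount_grid (n : Nat) (R C : List Int) (hR : R.Nodup) (hC : C.Nodup)
    (hRm : ∀ x ∈ R, 0 ≤ x ∧ x < (n : Int)) (hCm : ∀ x ∈ C, 0 ≤ x ∧ x < (n : Int)) :
    count_negative_ones (pvGrid n R C)
      = ((n : Int) - R.length) * ((n : Int) - C.length) := by
  have hRlen : R.length ≤ n := by
    have h1 := pvCountP_range n R hR hRm
    have h2 := List.countP_le_length (l := List.range n) (p := fun (c : Nat) => decide ((c:Int) ∈ R))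
    rw [List.length_range] at h2
    omega
  have hClen : C.length ≤ n := by
    have h1 := pvCountP_range n C hC hCm
    have h2 := List.countP_le_length (l := List.range n) (p := fun (c : Nat) => decide ((c:Int) ∈ C))
    rw [List.length_range] at h2
    omega
  unfold count_negative_ones pvGrid
  rw [PySem.List.foldl_add _ (fun row => (PySem.List.count row (-1) : Int))]
  rw [zero_add, List.map_map]
  rw [List.map_congr_left (g := fun r : Nat => if (r : Int) ∈ R then 0 else ((n : Int) - C.length))
      (by
        intro r _
        simp only [Function.comp_apply]
        rw [pvCount_row n (fun (c : Nat) => (r : Int) ∈ R ∨ (c : Int) ∈ C)]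
        by_cases hrR : (r : Int) ∈ R
        · simp [hrR]
        · rw [if_neg hrR]
          have heq : (List.range n).countP (fun (c : Nat) => !decide ((r : Int) ∈ R ∨ (c : Int) ∈ C))
              = (List.range n).countP (fun (c : Nat) => !decide ((c : Int) ∈ C)) :=
            List.countP_congr (by intro c _; simp [hrR])
          rw [heq, pvCountP_neg n C hC hCm]
          push_cast [hClen]
          ring)]
  rw [pvSum_ite (List.range n) ((n : Int) - C.length) (fun (r : Nat) => (r : Int) ∈ R)]
  rw [pvCountP_neg n R hR hRm]
  push_cast [hRlen]
  ring

-- the common intermediate: A's fold and B's fold are both related to this set-based fold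
theorem pvMain (N : Int) (hN : 0 < N) :
    ∀ (tasks : List (Int × Int)),
      (∀ p ∈ tasks, (-N ≤ p.1 ∧ p.1 < N) ∧ (-N ≤ p.2 ∧ p.2 < N)) →
      ∀ (R C : PySem.Set Int) (out : List Int),
      R.Nodup → C.Nodup →
      (∀ x ∈ R, 0 ≤ x ∧ x < N) → (∀ x ∈ C, 0 ≤ x ∧ x < N) →
      (tasks.foldl (fun (st : List (List Int) × List Int) ij =>
          let m1 := (PySem.List.pyRange 0 N 1).foldl (fun m col => pvSetCell m ij.1 col 0) st.1
          let m2 := (PySem.List.pyRange 0 N 1).foldl (fun m row => pvSetCell m row ij.2 0) m1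
          (m2, st.2 ++ [count_negative_ones m2])) (pvGrid N.toNat R C, out)).2
      = (tasks.foldl (fun (st : PySem.Set Int × PySem.Set Int × List Int) ij =>
          let rows := PySem.Set.add st.1 (ij.1 % N)
          let cols := PySem.Set.add st.2.1 (ij.2 % N)
          (rows, cols, st.2.2 ++ [(N - (rows.length : Int)) * (N - (cols.length : Int))]))
          (R, C, out)).2.2 := by
  intro tasks
  induction tasks with
  | nil =>
    intro _ R C out _ _ _ _
    rfl
  | cons p rest ih =>
    intro hpre R C out hRn hCn hRm hCm
    obtain ⟨i, j⟩ := p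
    have hp := hpre (i, j) (List.mem_cons_self ..)
    have hi0 : 0 ≤ i % N := Int.emod_nonneg i (by omega)
    have hiN : i % N < N := Int.emod_lt_of_pos i hN
    have hj0 : 0 ≤ j % N := Int.emod_nonneg j (by omega)
    have hjN : j % N < N := Int.emod_lt_of_pos j hN
    have hGlen : ((pvGrid N.toNat R C).length : Int) = N := by
      rw [pvGrid_length]; omega
    have hGrows : ∀ r ∈ pvGrid N.toNat R C, (r.length : Int) = N := by
      intro r hr
      rw [pvGrid_row_length N.toNat R C r hr]; omega
    have hm1 := pvRowFill N i hp.1.1 hp.1.2 (pvGrid N.toNat R C) hGlen hGrows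
    have hM1len : (((pvGrid N.toNat R C).set (i % N).toNat (List.replicate N.toNat 0)).length : Int) = N := by
      rw [List.length_set]; exact hGlen
    have hM1rows : ∀ r ∈ (pvGrid N.toNat R C).set (i % N).toNat (List.replicate N.toNat 0), (r.length : Int) = N := by
      intro r hr
      rcases List.mem_or_eq_of_mem_set hr with h | h
      · exact hGrows r h
      · rw [h, List.length_replicate]; omega
    have hm2 := pvColFill N j hN _ hM1len
    have hmap : ((pvGrid N.toNat R C).set (i % N).toNat (List.replicate N.toNat 0)).map (fun r => PySem.List.pySetD r j 0)
        = ((pvGrid N.toNat R C).set (i % N).toNat (List.replicate N.toNat 0)).map (fun r => r.set (j % N).toNat 0) :=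
      List.map_congr_left (fun r hr => pySetD_mod N r j 0 (hM1rows r hr) hp.2.1 hp.2.2)
    have hgrid := pvGrid_step N.toNat R C (PySem.Set.add R (i % N)) (PySem.Set.add C (j % N))
        (i % N).toNat (j % N).toNat (by omega) (by omega)
        (by
          intro x
          rw [PySem.Set.mem_add]
          rw [Int.toNat_of_nonneg hi0])
        (by
          intro x
          rw [PySem.Set.mem_add]
          rw [Int.toNat_of_nonneg hj0])
    have hR'n : (PySem.Set.add R (i % N)).Nodup := PySem.Set.nodup_add R (i % N) hRn
    have hC'n : (PySem.Set.add C (j % N)).Nodup := PySem.Set.nodup_add C (j % N) hCn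
    have hR'm : ∀ x ∈ PySem.Set.add R (i % N), 0 ≤ x ∧ x < N := by
      intro x hx
      rcases (PySem.Set.mem_add R (i % N) x).mp hx with h | h
      · exact hRm x h
      · omega
    have hC'm : ∀ x ∈ PySem.Set.add C (j % N), 0 ≤ x ∧ x < N := by
      intro x hx
      rcases (PySem.Set.mem_add C (j % N) x).mp hx with h | h
      · exact hCm x h
      · omega
    have hcount := pvCount_grid N.toNat (PySem.Set.add R (i % N)) (PySem.Set.add C (j % N))
        hR'n hC'n
        (by intro x hx; have := hR'm x hx; omega)
        (by intro x hx; have := hC'm x hx; omega)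
    simp only [List.foldl_cons]
    rw [hm1, hm2, hmap, hgrid, hcount]
    rw [show ((N.toNat : Int)) = N by omega]
    exact ih (fun p hp => hpre p (List.mem_cons_of_mem _ hp)) _ _ _ hR'n hC'n hR'm hC'm

-- marker array of a set of marked indices
def pvMark (n : Nat) (R : List Int) : List Bool :=
  (List.range n).map (fun (k : Nat) => decide (((k : Nat) : Int) ∈ R))

theorem pvMark_length (n : Nat) (R : List Int) : (pvMark n R).length = n := by
  simp [pvMark]

theorem pvMark_nil (n : Nat) : pvMark n [] = List.replicate n false := by
  simp [pvMark, List.map_const']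

theorem pvMark_getElem (n : Nat) (R : List Int) (k : Nat) (hk : k < (pvMark n R).length) :
    (pvMark n R)[k] = decide ((k : Int) ∈ R) := by
  simp only [pvMark]
  rw [List.getElem_map, List.getElem_range]

theorem pvMark_get (N i : Int) (hN : 0 < N) (h1 : -N ≤ i) (h2 : i < N) (R : List Int) :
    PySem.List.pyGetD (pvMark N.toNat R) i false = decide ((i % N) ∈ R) := by
  have hi0 : 0 ≤ i % N := Int.emod_nonneg i (by omega)
  have hiN : i % N < N := Int.emod_lt_of_pos i hN
  rw [pyGetD_mod N _ i false (by rw [pvMark_length]; omega) h1 h2]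
  have hlt : (i % N).toNat < (pvMark N.toNat R).length := by rw [pvMark_length]; omega
  rw [List.getD_eq_getElem?_getD, List.getElem?_eq_getElem hlt, Option.getD_some,
      pvMark_getElem _ _ _ hlt, Int.toNat_of_nonneg hi0]

theorem pvMark_set (N i : Int) (hN : 0 < N) (h1 : -N ≤ i) (h2 : i < N) (R : List Int) :
    PySem.List.pySetD (pvMark N.toNat R) i true = pvMark N.toNat (R ++ [i % N]) := by
  have hi0 : 0 ≤ i % N := Int.emod_nonneg i (by omega)
  have hiN : i % N < N := Int.emod_lt_of_pos i hN
  rw [pySetD_mod N _ i true (by rw [pvMark_length]; omega) h1 h2]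
  apply List.ext_getElem
  · simp [pvMark]
  · intro k hk1 hk2
    have hkn : k < (pvMark N.toNat R).length := by
      rw [pvMark_length]; simpa [pvMark] using hk2
    rw [List.getElem_set, pvMark_getElem _ _ _ hk2]
    by_cases hk : (i % N).toNat = k
    · rw [if_pos hk]
      have hki : (k : Int) = i % N := by omega
      simp [List.mem_append, hki]
    · rw [if_neg hk, pvMark_getElem _ _ _ hkn]
      have hki : ¬ (k : Int) = i % N := by omega
      simp [List.mem_append, hki]

theorem pvSet_add_mem (R : PySem.Set Int) (x : Int) (h : x ∈ R) : PySem.Set.add R x = R := by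
  simp [PySem.Set.add, PySem.Set.contains, h]

theorem pvSet_add_not_mem (R : PySem.Set Int) (x : Int) (h : ¬ x ∈ R) :
    PySem.Set.add R x = R ++ [x] := by
  simp [PySem.Set.add, PySem.Set.contains, h]

-- B's marker fold equals the set-based fold
theorem pvMarkerMain (N : Int) (hN : 0 < N) :
    ∀ (tasks : List (Int × Int)),
      (∀ p ∈ tasks, (-N ≤ p.1 ∧ p.1 < N) ∧ (-N ≤ p.2 ∧ p.2 < N)) →
      ∀ (R C : PySem.Set Int) (out : List Int),
      (tasks.foldl (fun (st : List Bool × List Bool × Int × Int × List Int) ij =>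
          let rr := if !(PySem.List.pyGetD st.1 ij.1 false)
                    then (PySem.List.pySetD st.1 ij.1 true, st.2.2.1 + 1)
                    else (st.1, st.2.2.1)
          let cc := if !(PySem.List.pyGetD st.2.1 ij.2 false)
                    then (PySem.List.pySetD st.2.1 ij.2 true, st.2.2.2.1 + 1)
                    else (st.2.1, st.2.2.2.1)
          (rr.1, cc.1, rr.2, cc.2, st.2.2.2.2 ++ [(N - rr.2) * (N - cc.2)]))
        (pvMark N.toNat R, pvMark N.toNat C, (R.length : Int), (C.length : Int), out)).2.2.2.2
      = (tasks.foldl (fun (st : PySem.Set Int × PySem.Set Int × List Int) ij =>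
          let rows := PySem.Set.add st.1 (ij.1 % N)
          let cols := PySem.Set.add st.2.1 (ij.2 % N)
          (rows, cols, st.2.2 ++ [(N - (rows.length : Int)) * (N - (cols.length : Int))]))
          (R, C, out)).2.2 := by
  intro tasks
  induction tasks with
  | nil =>
    intro _ R C out
    rfl
  | cons p rest ih =>
    intro hpre R C out
    obtain ⟨i, j⟩ := p
    have hp := hpre (i, j) (List.mem_cons_self ..)
    have hgi := pvMark_get N i hN hp.1.1 hp.1.2 R
    have hgj := pvMark_get N j hN hp.2.1 hp.2.2 C
    have hrest : ∀ p ∈ rest, (-N ≤ p.1 ∧ p.1 < N) ∧ (-N ≤ p.2 ∧ p.2 < N) :=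
      fun p hp => hpre p (List.mem_cons_of_mem _ hp)
    simp only [List.foldl_cons, hgi, hgj]
    by_cases hiR : (i % N) ∈ R <;> by_cases hjC : (j % N) ∈ C
    · simp only [hiR, hjC, decide_true, Bool.not_true, Bool.false_eq_true, if_false,
        pvSet_add_mem R _ hiR, pvSet_add_mem C _ hjC]
      exact ih hrest R C _
    · simp only [hiR, hjC, decide_true, decide_false, Bool.not_true, Bool.not_false,
        Bool.false_eq_true, if_false, if_true,
        pvSet_add_mem R _ hiR, pvSet_add_not_mem C _ hjC,
        pvMark_set N j hN hp.2.1 hp.2.2 C]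
      have hlen : (C.length : Int) + 1 = ((C ++ [j % N]).length : Int) := by
        simp
      rw [hlen]
      exact ih hrest R (C ++ [j % N]) _
    · simp only [hiR, hjC, decide_true, decide_false, Bool.not_true, Bool.not_false,
        Bool.false_eq_true, if_false, if_true,
        pvSet_add_not_mem R _ hiR, pvSet_add_mem C _ hjC,
        pvMark_set N i hN hp.1.1 hp.1.2 R]
      have hlen : (R.length : Int) + 1 = ((R ++ [i % N]).length : Int) := by
        simp
      rw [hlen]
      exact ih hrest (R ++ [i % N]) C _
    · simp only [hiR, hjC, decide_false, Bool.not_false, if_true,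
        pvSet_add_not_mem R _ hiR, pvSet_add_not_mem C _ hjC,
        pvMark_set N i hN hp.1.1 hp.1.2 R, pvMark_set N j hN hp.2.1 hp.2.2 C]
      have hlenR : (R.length : Int) + 1 = ((R ++ [i % N]).length : Int) := by simp
      have hlenC : (C.length : Int) + 1 = ((C ++ [j % N]).length : Int) := by simp
      rw [hlenR, hlenC]
      exact ih hrest (R ++ [i % N]) (C ++ [j % N]) _

theorem pvSetCell_nil (i c v : Int) : pvSetCell [] i c v = [] := by
  simp only [pvSetCell, PySem.List.pySetD, PySem.List.pySet?, PySem.List.pyIdx?, List.length_nil]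
  split_ifs <;> rfl

theorem pvFoldl_nil {β : Type} (l : List β) (g : List (List Int) → β → List (List Int))
    (h : ∀ x, g [] x = []) : l.foldl g [] = [] := by
  induction l with
  | nil => rfl
  | cons x xs ih => rw [List.foldl_cons, h x, ih]

theorem pvZero (N : Int) (tasks : List (Int × Int)) :
    ∀ out : List Int,
      (tasks.foldl (fun (st : List (List Int) × List Int) ij =>
          let m1 := (PySem.List.pyRange 0 N 1).foldl (fun m col => pvSetCell m ij.1 col 0) st.1
          let m2 := (PySem.List.pyRange 0 N 1).foldl (fun m row => pvSetCell m row ij.2 0) m1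
          (m2, st.2 ++ [count_negative_ones m2])) (([] : List (List Int)), out)).2
      = out ++ List.replicate tasks.length 0 := by
  induction tasks with
  | nil => intro out; simp
  | cons p rest ih =>
    intro out
    rw [List.foldl_cons]
    rw [show (let m1 := List.foldl (fun m col => pvSetCell m p.1 col 0) (([] : List (List Int)), out).1 (PySem.List.pyRange 0 N 1);
          let m2 := List.foldl (fun m row => pvSetCell m row p.2 0) m1 (PySem.List.pyRange 0 N 1);
          (m2, (([] : List (List Int)), out).2 ++ [count_negative_ones m2]))
      = (([] : List (List Int)), out ++ [(0 : Int)]) from by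
        show ((PySem.List.pyRange 0 N 1).foldl (fun m row => pvSetCell m row p.2 0)
               ((PySem.List.pyRange 0 N 1).foldl (fun m col => pvSetCell m p.1 col 0) []),
              out ++ [count_negative_ones _]) = _
        rw [pvFoldl_nil _ _ (fun x => pvSetCell_nil p.1 x 0),
            pvFoldl_nil _ _ (fun x => pvSetCell_nil x p.2 0)]
        rfl]
    rw [ih (out ++ [(0 : Int)])]
    simp [List.replicate_succ]

-- ===== VERDICT (by name: the statement is the Claim_ definition above) =====
theorem process_tasks_spec : Claim_equal_process_tasks := by
  intro N K tasks _ hpre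
  unfold Spec_process_tasks process_tasks process_tasks_alt
  by_cases hN0 : N ≤ 0
  · rw [if_pos hN0]
    have hmat : ((PySem.List.pyRange 0 N 1).map
        (fun _ => (PySem.List.pyRange 0 N 1).map (fun _ => (-1 : Int)))) = ([] : List (List Int)) := by
      rw [PySem.List.pyRange_one_eq_nil (by omega)]
      rfl
    simp only []
    rw [hmat, pvZero N tasks []]
    rfl
  rw [if_neg hN0]
  cases tasks with
  | nil => rfl
  | cons p rest =>
    have hN : 0 < N := by omega
    have hvalid := hpre.resolve_left (by omega)
    have hinit : ((PySem.List.pyRange 0 N 1).map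
        (fun _ => (PySem.List.pyRange 0 N 1).map (fun _ => (-1 : Int))))
        = pvGrid N.toNat [] [] := by
      simp [pvGrid, PySem.List.pyRange_one, Function.comp_def]
    simp only []
    rw [hinit]
    rw [pvMain N hN (p :: rest) hvalid [] [] [] (by simp) (by simp) (by simp) (by simp)]
    have h := pvMarkerMain N hN (p :: rest) hvalid [] [] []
    rw [pvMark_nil] at h
    simpa using h.symm
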